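-- pv_equiv track=rewrite | github.com/elliotttmiller/poker-ai | agent/modules/heuristics.py | _is_dry_board
-- ===== SOURCE A (Python) =====
-- from typing import Dict, Any, Optional, List
--
-- def _is_dry_board(community_cards: List[str]) -> bool:
--     """Check if the board is dry (few draws available)."""
--     if len(community_cards) < 3:
--         return False
--
--     # Parse ranks and suits
--     ranks = [card[0] for card in community_cards]
--     suits = [card[1] for card in community_cards]
--
--     # Check for flush draws
--     suit_counts = {}
--     for suit in suits:
--         suit_counts[suit] = suit_counts.get(suit, 0) + 1
--
--     max_suit_count = max(suit_counts.values())
--     if max_suit_count >= 3:  # Flush draw possible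
--         return False
--
--     # Check for straight draws
--     rank_values = {'A': 14, 'K': 13, 'Q': 12, 'J': 11, 'T': 10}
--     numeric_ranks = []
--     for rank in ranks:
--         if rank in rank_values:
--             numeric_ranks.append(rank_values[rank])
--         else:
--             numeric_ranks.append(int(rank))
--
--     numeric_ranks.sort()
--
--     # Check for potential straights
--     for i in range(len(numeric_ranks) - 1):
--         if numeric_ranks[i+1] - numeric_ranks[i] <= 2:  # Close ranks = straight draws
--             return False
--
--     return True  # Board is dry
-- ===== SOURCE B (Python) =====
-- def _is_dry_board(community_cards):
--     """Check if the board is dry (few draws available)."""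
--     if len(community_cards) < 3:
--         return False
--
--     # Flush draw check: any suit appearing 3+ times
--     suits = [card[1] for card in community_cards]
--     if any(suits.count(s) >= 3 for s in suits):
--         return False
--
--     # Straight draw check: any pair of ranks within 2 of each other (no sorting)
--     rank_values = {'A': 14, 'K': 13, 'Q': 12, 'J': 11, 'T': 10}
--     nums = []
--     for card in community_cards:
--         v = rank_values.get(card[0])
--         nums.append(v if v is not None else int(card[0]))
--
--     for i in range(len(nums)):
--         for j in range(i + 1, len(nums)):
--             if abs(nums[i] - nums[j]) <= 2:
--                 return False
--
--     return True
-- ===== Notes on version B (the rewrite author's own statement) =====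
-- stated objective: alternative
-- what changed: The flush check uses any(suits.count(s) >= 3) instead of building a count dict and taking max, and the straight check compares all unordered rank pairs with abs(diff) <= 2 instead of sorting and scanning adjacent gaps.
import Mathlib
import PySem

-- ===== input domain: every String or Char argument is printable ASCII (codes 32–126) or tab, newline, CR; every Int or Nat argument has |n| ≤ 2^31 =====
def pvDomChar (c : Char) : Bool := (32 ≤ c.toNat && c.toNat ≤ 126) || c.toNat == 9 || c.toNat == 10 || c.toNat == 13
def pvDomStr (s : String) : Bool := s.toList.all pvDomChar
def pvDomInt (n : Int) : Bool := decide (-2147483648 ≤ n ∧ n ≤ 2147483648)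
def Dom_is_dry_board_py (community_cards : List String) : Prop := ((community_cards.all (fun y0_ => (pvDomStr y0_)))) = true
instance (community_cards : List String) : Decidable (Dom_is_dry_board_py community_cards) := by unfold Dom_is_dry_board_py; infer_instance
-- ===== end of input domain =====

-- B replaces A's count-dict + max flush test by any(suits.count(s) >= 3) and A's
-- sort-then-adjacent-gap straight test by a sortless all-pairs |difference| <= 2 scan
-- (alternative decomposition, same exact results).

-- shared literal: the rank_values dict both Pythons write out
def pvRankValues : PySem.Dict Char Int :=
  PySem.Dict.ofList [('A', 14), ('K', 13), ('Q', 12), ('J', 11), ('T', 10)]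

-- ===== PORT A =====
-- 'if rank in rank_values: rank_values[rank] else int(rank)'; the getD 0 branch of
-- int() is unreachable under Pre_ (ValueError excluded there)
def pvParseA (r : Char) : Int :=
  if pvRankValues.contains r then pvRankValues.getD r 0
  else (PySem.Int.ofStr? (String.ofList [r])).getD 0

-- 'for i in range(len(nr)-1): if nr[i+1]-nr[i] <= 2: return False / return True'
def pvAdjScan : List Int → Bool
  | a :: b :: t => if b - a ≤ 2 then false else pvAdjScan (b :: t)
  | _ => true

def is_dry_board_py (community_cards : List String) : Bool :=
  if community_cards.length < 3 then false
  else
    -- card[0] / card[1]: the .getD ' ' default is unreachable under Pre_ (IndexError excluded)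
    let ranks := community_cards.map (fun card => (PySem.Str.pyGet? card 0).getD ' ')
    let suits := community_cards.map (fun card => (PySem.Str.pyGet? card 1).getD ' ')
    let suit_counts := suits.foldl (fun d s => d.insert s (d.getD s 0 + 1)) (PySem.Dict.empty : PySem.Dict Char Int)
    match PySem.List.max? suit_counts.values (fun v => v) with
    | none => false  -- unreachable: suits is nonempty here (len >= 3)
    | some max_suit_count =>
      if 3 ≤ max_suit_count then false
      else
        pvAdjScan (PySem.List.sorted (ranks.map pvParseA) (fun x => x) false)

-- ===== PORT B =====
-- 'v = rank_values.get(card[0]); v if v is not None else int(card[0])'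
def pvParseB (c : Char) : Int :=
  match pvRankValues.get? c with
  | some v => v
  | none => (PySem.Int.ofStr? (String.ofList [c])).getD 0

-- 'for i: for j in range(i+1, n): if abs(nums[i]-nums[j]) <= 2: return False / return True'
def pvPairScan : List Int → Bool
  | [] => true
  | x :: rest =>
    if rest.any (fun y => (x - y).natAbs ≤ 2) then false else pvPairScan rest

def is_dry_board_py_alt (community_cards : List String) : Bool :=
  if community_cards.length < 3 then false
  else
    let suits := community_cards.map (fun card => (PySem.Str.pyGet? card 1).getD ' ')
    if suits.any (fun s => 3 ≤ suits.count s) then false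
    else
      pvPairScan (community_cards.map (fun card => pvParseB ((PySem.Str.pyGet? card 0).getD ' ')))

-- ===== PRECONDITION & SPEC =====
-- Pre_ excludes exactly the inputs where the Python A raises: with 3+ cards, a card
-- shorter than 2 chars (IndexError on card[0]/card[1]), and — unless a flush suit
-- makes A return False before parsing — a first char that is neither a rank letter
-- with a dict entry nor a digit (ValueError from int()).
def Pre_is_dry_board_py (community_cards : List String) : Prop :=
  3 ≤ community_cards.length →
    ((∀ c ∈ community_cards, 2 ≤ c.toList.length) ∧
      ((∃ s ∈ community_cards.map (fun card => (PySem.Str.pyGet? card 1).getD ' '),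
          3 ≤ (community_cards.map (fun card => (PySem.Str.pyGet? card 1).getD ' ')).count s) ∨
        ∀ c ∈ community_cards,
          (pvRankValues.contains ((PySem.Str.pyGet? c 0).getD ' ') = true ∨
            (PySem.Int.ofStr? (String.ofList [(PySem.Str.pyGet? c 0).getD ' '])).isSome = true)))
instance (community_cards : List String) : Decidable (Pre_is_dry_board_py community_cards) := by
  unfold Pre_is_dry_board_py; infer_instance

def pvWitness_is_dry_board_py : List String := ["2h", "7d"]

def Spec_is_dry_board_py (community_cards : List String) (out : Bool) : Prop := out = is_dry_board_py_alt community_cards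
instance (community_cards : List String) (out : Bool) : Decidable (Spec_is_dry_board_py community_cards out) := by unfold Spec_is_dry_board_py; infer_instance

-- ===== CLAIM (what is proved, stated in full; the proofs are below) =====
def Claim_equal_is_dry_board_py : Prop := ∀ (community_cards : List String), Dom_is_dry_board_py community_cards → Pre_is_dry_board_py community_cards → Spec_is_dry_board_py community_cards (is_dry_board_py community_cards)

-- ===== LEMMAS AND PROOFS =====

-- the two parse helpers agree on every character
theorem pvParse_eq (r : Char) : pvParseA r = pvParseB r := by
  unfold pvParseA pvParseB
  rw [PySem.Dict.contains_eq_isSome_get?]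
  cases h : pvRankValues.get? r with
  | none => simp
  | some v => simp [h, PySem.Dict.getD_eq_get?_getD]

-- "some unordered pair of entries is within 2"
def pvClose (l : List Int) : Prop :=
  ∃ a b, [a, b].Sublist l ∧ (a - b).natAbs ≤ 2

theorem pvPairScan_false_iff (l : List Int) : pvPairScan l = false ↔ pvClose l := by
  induction l with
  | nil =>
    simp only [pvPairScan, pvClose]
    constructor
    · intro h; cases h
    · rintro ⟨a, b, hs, _⟩; cases hs
  | cons x rest ih =>
    simp only [pvPairScan]
    constructor
    · intro h
      by_cases hany : rest.any (fun y => decide ((x - y).natAbs ≤ 2)) = true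
      · obtain ⟨y, hy, hle⟩ := List.any_eq_true.mp hany
        exact ⟨x, y, List.cons_sublist_cons.mpr (List.singleton_sublist.mpr hy),
          of_decide_eq_true hle⟩
      · rw [if_neg hany] at h
        obtain ⟨a, b, hs, hab⟩ := ih.mp h
        exact ⟨a, b, hs.cons x, hab⟩
    · rintro ⟨a, b, hs, hab⟩
      rcases List.sublist_cons_iff.mp hs with hrest | ⟨r, hr, hrs⟩
      · -- pair fully inside rest
        by_cases hany : rest.any (fun y => decide ((x - y).natAbs ≤ 2)) = true
        · simp [hany]
        · rw [if_neg hany]; exact ih.mpr ⟨a, b, hrest, hab⟩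
      · -- a = x, b ∈ rest
        cases hr
        have hb : b ∈ rest := List.singleton_sublist.mp hrs
        have : rest.any (fun y => decide ((x - y).natAbs ≤ 2)) = true :=
          List.any_eq_true.mpr ⟨b, hb, decide_eq_true hab⟩
        simp [this]

theorem pvAdjScan_false_iff (l : List Int) (hl : l.Pairwise (· ≤ ·)) :
    pvAdjScan l = false ↔ pvClose l := by
  induction l with
  | nil =>
    simp only [pvAdjScan, pvClose]
    constructor
    · intro h; cases h
    · rintro ⟨a, b, hs, _⟩; cases hs
  | cons a t ih =>
    cases t with
    | nil =>
      simp only [pvAdjScan, pvClose]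
      constructor
      · intro h; cases h
      · rintro ⟨p, q, hs, _⟩
        rcases List.sublist_cons_iff.mp hs with h1 | ⟨r, hr, hrs⟩
        · cases h1
        · cases hr; cases hrs
    | cons b t' =>
      have hpw' : (b :: t').Pairwise (· ≤ ·) := hl.of_cons
      have hab : a ≤ b := (List.pairwise_cons.mp hl).1 b (by simp)
      have ih' := ih hpw'
      simp only [pvAdjScan]
      by_cases hba : b - a ≤ 2
      · rw [if_pos hba]
        constructor
        · intro _
          exact ⟨a, b, List.cons_sublist_cons.mpr (List.cons_sublist_cons.mpr (List.nil_sublist _)),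
            by omega⟩
        · intro _; rfl
      · rw [if_neg hba]
        constructor
        · intro h
          obtain ⟨p, q, hs, hpq⟩ := ih'.mp h
          exact ⟨p, q, hs.cons a, hpq⟩
        · rintro ⟨p, q, hs, hpq⟩
          rcases List.sublist_cons_iff.mp hs with h1 | ⟨r, hr, hrs⟩
          · exact ih'.mpr ⟨p, q, h1, hpq⟩
          · cases hr
            have hq : q ∈ b :: t' := List.singleton_sublist.mp hrs
            have hbq : b ≤ q := by
              rcases hq with _ | hq'
              · exact le_refl _
              · exact (List.pairwise_cons.mp hpw').1 q (by assumption)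
            omega

theorem pvPerm_pair {x y a b : Int} (h : [x, y].Perm [a, b]) :
    (x = a ∧ y = b) ∨ (x = b ∧ y = a) := by
  have hx : x ∈ [a, b] := h.subset (by simp)
  rcases List.mem_pair.mp hx with hxa | hxb
  · subst hxa
    have : [y].Perm [b] := h.cons_inv
    exact Or.inl ⟨rfl, by simpa using List.perm_singleton.mp this⟩
  · subst hxb
    have h2 : [x, y].Perm [x, a] := h.trans (List.Perm.swap x a [])
    have : [y].Perm [a] := h2.cons_inv
    exact Or.inr ⟨rfl, by simpa using List.perm_singleton.mp this⟩

theorem pvClose_of_perm {l l' : List Int} (h : l.Perm l') (hc : pvClose l) : pvClose l' := by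
  obtain ⟨a, b, hs, hab⟩ := hc
  have hsp : [a, b].Subperm l' := (hs.subperm).trans h.subperm
  obtain ⟨l₀, hperm, hsub⟩ := hsp
  obtain ⟨x, y, rfl⟩ := List.length_eq_two.mp (hperm.length_eq.trans rfl)
  rcases pvPerm_pair hperm with ⟨hxa, hyb⟩ | ⟨hxb, hya⟩
  · exact ⟨x, y, hsub, by rw [hxa, hyb]; exact hab⟩
  · exact ⟨x, y, hsub, by rw [hxb, hya]; omega⟩

-- the core: adjacent scan on the sorted list ≡ all-pairs scan on the raw list
theorem pvScan_eq (l : List Int) :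
    pvAdjScan (PySem.List.sorted l (fun x => x) false) = pvPairScan l := by
  have hperm : (PySem.List.sorted l (fun x => x) false).Perm l := PySem.List.sorted_perm l _ _
  have hpw : (PySem.List.sorted l (fun x => x) false).Pairwise (· ≤ ·) := by
    have := PySem.List.sorted_pairwise (xs := l) (key := fun x => x)
    simpa using this
  have h1 := pvAdjScan_false_iff _ hpw
  have h2 := pvPairScan_false_iff l
  have hiff : pvClose (PySem.List.sorted l (fun x => x) false) ↔ pvClose l :=
    ⟨pvClose_of_perm hperm, pvClose_of_perm hperm.symm⟩
  cases ha : pvAdjScan (PySem.List.sorted l (fun x => x) false) <;>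
    cases hb : pvPairScan l
  · rfl
  · exact absurd (h2.mpr (hiff.mp (h1.mp ha))) (by simp [hb])
  · exact absurd (h1.mpr (hiff.mpr (h2.mp hb))) (by simp [ha])
  · rfl

-- the flush part: max of the counter's values is ≥ 3 iff some suit occurs ≥ 3 times
theorem pvFlush_eq (suits : List Char) (hne : suits ≠ []) :
    ∃ m, PySem.List.max?
        (suits.foldl (fun d s => d.insert s (d.getD s 0 + 1)) (PySem.Dict.empty : PySem.Dict Char Int)).values
        (fun v => v) = some m ∧
      ((3 ≤ m) ↔ ∃ s ∈ suits, 3 ≤ suits.count s) := by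
  rw [PySem.Dict.foldl_insert_getD_add_one_eq_counter]
  have hvals : (PySem.Dict.counter suits).values
      = (PySem.Set.ofList suits).map (fun k => (suits.count k : Int)) := by
    have := PySem.Dict.items_counter (xs := suits)
    simp only [PySem.Dict.values, this, List.map_map]
    rfl
  have hvne : (PySem.Dict.counter suits).values ≠ [] := by
    rw [hvals]
    simp only [ne_eq, List.map_eq_nil_iff]
    intro h
    rcases List.exists_mem_of_ne_nil suits hne with ⟨x, hx⟩
    have : x ∈ PySem.Set.ofList suits := (PySem.Set.mem_ofList _ _).mpr hx
    rw [h] at this; cases this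
  cases hm : PySem.List.max? (PySem.Dict.counter suits).values (fun v => v) with
  | none => exact absurd ((PySem.List.max?_eq_none_iff _ _).mp hm) hvne
  | some m =>
    refine ⟨m, rfl, ?_⟩
    constructor
    · intro h3
      have hmem : m ∈ (PySem.Dict.counter suits).values := PySem.List.max?_mem hm
      rw [hvals] at hmem
      obtain ⟨k, hk, hkm⟩ := List.mem_map.mp hmem
      refine ⟨k, (PySem.Set.mem_ofList _ _).mp hk, ?_⟩
      omega
    · rintro ⟨s, hs, hcnt⟩
      have hmemv : (suits.count s : Int) ∈ (PySem.Dict.counter suits).values := by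
        rw [hvals]
        exact List.mem_map.mpr ⟨s, (PySem.Set.mem_ofList _ _).mpr hs, rfl⟩
      have := PySem.List.max?_isMax hm _ hmemv
      simp only at this
      omega

-- ===== VERDICT (by name: the statement is the Claim_ definition above) =====
theorem is_dry_board_py_spec : Claim_equal_is_dry_board_py := by
  intro cc _ _
  unfold Spec_is_dry_board_py is_dry_board_py is_dry_board_py_alt
  by_cases hlen : cc.length < 3
  · simp [hlen]
  · rw [if_neg hlen, if_neg hlen]
    dsimp only
    have hne : cc.map (fun card => (PySem.Str.pyGet? card 1).getD ' ') ≠ [] := by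
      intro h
      rw [List.map_eq_nil_iff] at h
      subst h
      simp at hlen
    obtain ⟨m, hm, hiff⟩ := pvFlush_eq _ hne
    rw [hm]
    dsimp only
    by_cases hflush : ∃ s ∈ cc.map (fun card => (PySem.Str.pyGet? card 1).getD ' '),
        3 ≤ (cc.map (fun card => (PySem.Str.pyGet? card 1).getD ' ')).count s
    · rw [if_pos (hiff.mpr hflush)]
      have : (cc.map (fun card => (PySem.Str.pyGet? card 1).getD ' ')).any
          (fun s => 3 ≤ (cc.map (fun card => (PySem.Str.pyGet? card 1).getD ' ')).count s) = true := by
        obtain ⟨s, hs, h3⟩ := hflush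
        exact List.any_eq_true.mpr ⟨s, hs, decide_eq_true h3⟩
      rw [if_pos this]
    · rw [if_neg (by intro h3; exact hflush (hiff.mp h3))]
      have : (cc.map (fun card => (PySem.Str.pyGet? card 1).getD ' ')).any
          (fun s => 3 ≤ (cc.map (fun card => (PySem.Str.pyGet? card 1).getD ' ')).count s) = false := by
        rw [← Bool.not_eq_true, List.any_eq_true]
        intro ⟨s, hs, h3⟩
        exact hflush ⟨s, hs, of_decide_eq_true h3⟩
      rw [if_neg (by rw [this]; simp)]
      have hmaps : (cc.map (fun card => (PySem.Str.pyGet? card 0).getD ' ')).map pvParseA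
          = cc.map (fun card => pvParseB ((PySem.Str.pyGet? card 0).getD ' ')) := by
        rw [List.map_map]
        exact List.map_congr_left (fun c _ => pvParse_eq _)
      rw [hmaps]
      exact pvScan_eq _
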